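-- pv_equiv track=rewrite | github.com/masthom/Music-History-Knowledge-Graph | import_rowjson.py | compute_forms_pitch_and_intervals
-- ===== SOURCE A (Python) =====
-- from typing import List, Tuple, Dict
--
-- def intervals(row: List[int]) -> List[int]:
--     """(x_{i+1}-x_i) mod 12 für i=0..n-2"""
--     return [ (row[i+1] - row[i]) % 12 for i in range(len(row)-1) ]
--
-- def inversion_by_first(row: List[int]) -> List[int]:
--     """Inversion um den ersten Ton p0: i_k = (2*p0 - p_k) mod 12"""
--     p0 = row[0]
--     return [ (2*p0 - p) % 12 for p in row ]
--
-- def retrograde(row: List[int]) -> List[int]: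
--     return list(reversed(row))
--
-- def compute_forms_pitch_and_intervals(row: List[int]) -> Dict[str, Dict[str, List[int]]]:
--     """
--     Liefert für P0/I/R/RI jeweils die Pitch-Sequenz und das Intervallmuster.
--     Rückgabeformat:
--       { "P0": {"pitches": [...], "intervals": [...]}, ... }
--     """
--     p0 = row
--     i = inversion_by_first(row)
--     r = retrograde(row)
--     ri = retrograde(i)
--     res = {}
--     for label, seq in (("P0", p0), ("I", i), ("R", r), ("RI", ri)):
--         res[label] = {
--             "pitches": seq,
--             "intervals": intervals(seq)
--         }
--     return res
-- ===== SOURCE B (Python) =====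
-- def compute_forms_pitch_and_intervals(row):
--     # One adjacent-pair scan gives the base interval list; the other three
--     # interval patterns are derived by mod-12 negation and reversal.
--     p0 = row[0]
--     inv = [(2 * p0 - p) % 12 for p in row]
--     base = [(b - a) % 12 for a, b in zip(row, row[1:])]
--     neg = [(-x) % 12 for x in base]
--     return {
--         "P0": {"pitches": row, "intervals": base},
--         "I":  {"pitches": inv, "intervals": neg},
--         "R":  {"pitches": row[::-1], "intervals": neg[::-1]},
--         "RI": {"pitches": inv[::-1], "intervals": base[::-1]},
--     }
-- ===== Notes on version B (the rewrite author's own statement) =====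
-- stated objective: simpler
-- what changed: B computes one base interval list from adjacent pairs (zip) and derives the I/R/RI interval patterns by mod-12 negation and list reversal instead of running the range-indexed interval scan on each of the four pitch sequences, and builds the result as a literal dict rather than a keyed insertion loop.
import Mathlib
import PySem

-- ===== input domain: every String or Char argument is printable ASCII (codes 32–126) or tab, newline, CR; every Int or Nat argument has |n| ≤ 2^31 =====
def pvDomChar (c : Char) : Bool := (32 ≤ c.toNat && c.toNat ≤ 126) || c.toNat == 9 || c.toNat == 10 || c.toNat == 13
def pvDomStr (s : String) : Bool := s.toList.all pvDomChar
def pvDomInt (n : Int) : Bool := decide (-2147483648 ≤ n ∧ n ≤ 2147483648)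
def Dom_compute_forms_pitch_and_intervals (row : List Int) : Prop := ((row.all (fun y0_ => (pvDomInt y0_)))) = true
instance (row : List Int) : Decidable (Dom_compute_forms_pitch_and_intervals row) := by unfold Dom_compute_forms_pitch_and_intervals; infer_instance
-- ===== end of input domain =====

-- B derives the I/R/RI interval patterns by mod-12 negation and reversal of one
-- base interval scan instead of four index-based interval scans (objective: simpler).

-- ===== PORT A =====
-- intervals: [(row[i+1]-row[i]) % 12 for i in range(len(row)-1)]
def pvIntervals (row : List Int) : List Int :=
  (PySem.List.pyRange 0 ((row.length : Int) - 1) 1).map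
    (fun i => PySem.Int.mod (PySem.List.pyGetD row (i + 1) 0 - PySem.List.pyGetD row i 0) 12)

-- inversion_by_first: p0 = first pitch; then (2*p0 - p) % 12 over the row (index 0 is in range on Pre_)
def pvInversionByFirst (row : List Int) : List Int :=
  let p0 := PySem.List.pyGetD row 0 0
  row.map (fun p => PySem.Int.mod (2 * p0 - p) 12)

-- retrograde: list(reversed(row))
def pvRetrograde (row : List Int) : List Int := row.reverse

def compute_forms_pitch_and_intervals (row : List Int) : List (String × List (String × List Int)) :=
  let p0 := row
  let i := pvInversionByFirst row
  let r := pvRetrograde row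
  let ri := pvRetrograde i
  let res : PySem.Dict String (List (String × List Int)) := PySem.Dict.empty
  let res := [("P0", p0), ("I", i), ("R", r), ("RI", ri)].foldl
    (fun res (ls : String × List Int) =>
      PySem.Dict.insert res ls.1 [("pitches", ls.2), ("intervals", pvIntervals ls.2)]) res
  res.items

-- ===== PORT B =====
-- base = [(b - a) % 12 for a, b in zip(row, row[1:])]   (row[1:] is drop 1)
def pvIvz (row : List Int) : List Int :=
  (row.zip (row.drop 1)).map (fun ab => PySem.Int.mod (ab.2 - ab.1) 12)

def compute_forms_pitch_and_intervals_alt (row : List Int) : List (String × List (String × List Int)) :=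
  let p0 := PySem.List.pyGetD row 0 0
  let inv := row.map (fun p => PySem.Int.mod (2 * p0 - p) 12)
  let base := pvIvz row
  let neg := base.map (fun x => PySem.Int.mod (-x) 12)
  -- [::-1] is reverse
  [ ("P0", [("pitches", row), ("intervals", base)]),
    ("I",  [("pitches", inv), ("intervals", neg)]),
    ("R",  [("pitches", row.reverse), ("intervals", neg.reverse)]),
    ("RI", [("pitches", inv.reverse), ("intervals", base.reverse)]) ]

-- ===== PRECONDITION & SPEC =====
-- Pre_ excludes only the empty row: there A raises IndexError (inversion_by_first reads the first pitch), and B reads it too.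
def Pre_compute_forms_pitch_and_intervals (row : List Int) : Prop := row ≠ []
instance (row : List Int) : Decidable (Pre_compute_forms_pitch_and_intervals row) := by unfold Pre_compute_forms_pitch_and_intervals; infer_instance
def pvWitness_compute_forms_pitch_and_intervals : List Int := [0, 4, 7]

def Spec_compute_forms_pitch_and_intervals (row : List Int) (out : List (String × List (String × List Int))) : Prop := out = compute_forms_pitch_and_intervals_alt row
instance (row : List Int) (out : List (String × List (String × List Int))) : Decidable (Spec_compute_forms_pitch_and_intervals row out) := by unfold Spec_compute_forms_pitch_and_intervals; infer_instance

-- ===== CLAIM (what is proved, stated in full; the proofs are below) =====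
def Claim_equal_compute_forms_pitch_and_intervals : Prop := ∀ (row : List Int), Dom_compute_forms_pitch_and_intervals row → Pre_compute_forms_pitch_and_intervals row → Spec_compute_forms_pitch_and_intervals row (compute_forms_pitch_and_intervals row)

-- ===== LEMMAS AND PROOFS =====

-- A's dict loop over the four (label, seq) pairs, evaluated: four distinct fresh keys append in order.
theorem pvA_eq (row : List Int) : compute_forms_pitch_and_intervals row =
    [("P0", [("pitches", row), ("intervals", pvIntervals row)]),
     ("I",  [("pitches", pvInversionByFirst row), ("intervals", pvIntervals (pvInversionByFirst row))]),
     ("R",  [("pitches", row.reverse), ("intervals", pvIntervals row.reverse)]),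
     ("RI", [("pitches", (pvInversionByFirst row).reverse), ("intervals", pvIntervals ((pvInversionByFirst row).reverse))])] := by
  simp [compute_forms_pitch_and_intervals, pvRetrograde, List.foldl,
        PySem.Dict.insert, PySem.Dict.contains, PySem.Dict.empty]

theorem pvMod12 (a : Int) : PySem.Int.mod a 12 = a % 12 :=
  PySem.Int.mod_eq_emod_of_pos (by norm_num)

-- A's range-indexed interval scan equals B's zip-based base scan.
theorem pvIntervals_eq (l : List Int) : pvIntervals l = pvIvz l := by
  apply List.ext_getElem
  · simp [pvIntervals, pvIvz, PySem.List.length_pyRange_one]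
  · intro k h1 h2
    have hk : k + 1 < l.length := by simp [pvIvz] at h2; omega
    simp only [pvIntervals, pvIvz, List.getElem_map, PySem.List.getElem_pyRange_one,
      List.getElem_zip, List.getElem_drop]
    have e1 : (0 : Int) + (k : Int) + 1 = ((k + 1 : Nat) : Int) := by omega
    have e2 : (0 : Int) + (k : Int) = ((k : Nat) : Int) := by omega
    have e3 : 1 + k = k + 1 := Nat.add_comm 1 k
    rw [e1, e2, PySem.List.pyGetD_natCast, PySem.List.pyGetD_natCast,
      List.getD_eq_getElem l 0 hk, List.getD_eq_getElem l 0 (by omega)]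
    simp only [e3]

-- base intervals of the inversion = mod-12 negation of the base intervals.
theorem pvIvz_map_inv (l : List Int) (p0 : Int) :
    pvIvz (l.map (fun p => PySem.Int.mod (2 * p0 - p) 12)) =
      (pvIvz l).map (fun x => PySem.Int.mod (-x) 12) := by
  apply List.ext_getElem
  · simp [pvIvz]
  · intro k h1 h2
    have hk : k + 1 < l.length := by simp [pvIvz] at h2; omega
    simp only [pvIvz, List.getElem_map, List.getElem_zip, List.getElem_drop, pvMod12]
    omega

-- base intervals of the retrograde = reverse of the negated base intervals.
theorem pvIvz_reverse (l : List Int) :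
    pvIvz l.reverse = ((pvIvz l).map (fun x => PySem.Int.mod (-x) 12)).reverse := by
  apply List.ext_getElem
  · simp [pvIvz]
  · intro k h1 h2
    have hk : k < l.length - 1 := by simp [pvIvz] at h1; omega
    simp only [pvIvz, List.getElem_map, List.getElem_zip, List.getElem_drop,
      List.getElem_reverse, List.length_map, List.length_zip, List.length_drop, pvMod12]
    have e1 : l.length - 1 - (1 + k) = l.length - 2 - k := by omega
    have e2 : min l.length (l.length - 1) - 1 - k = l.length - 2 - k := by omega
    have e3 : 1 + (l.length - 2 - k) = l.length - 1 - k := by omega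
    simp only [e1, e2, e3]
    omega

-- double mod-12 negation is the identity on base-interval entries (already reduced mod 12).
theorem pvIvz_neg_neg (l : List Int) :
    ((pvIvz l).map (fun x => PySem.Int.mod (-x) 12)).map (fun x => PySem.Int.mod (-x) 12) = pvIvz l := by
  apply List.ext_getElem
  · simp
  · intro k h1 h2
    simp only [pvIvz, List.getElem_map, List.getElem_zip, List.getElem_drop, pvMod12]
    omega

-- ===== VERDICT (by name: the statement is the Claim_ definition above) =====
theorem compute_forms_pitch_and_intervals_spec : Claim_equal_compute_forms_pitch_and_intervals := by
  intro row _ _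
  show compute_forms_pitch_and_intervals row = compute_forms_pitch_and_intervals_alt row
  rw [pvA_eq]
  simp only [compute_forms_pitch_and_intervals_alt, pvInversionByFirst,
    pvIntervals_eq, pvIvz_map_inv, pvIvz_reverse, pvIvz_neg_neg]
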